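-- pv_equiv track=rewrite | github.com/hgarg1/UnScripted | ml/common/scoring.py | cluster_topic_labels
-- ===== SOURCE A (Python) =====
-- from collections.abc import Iterable
--
-- def cluster_topic_labels(texts: Iterable[str]) -> list[str]:
--     labels: list[str] = []
--     for text in texts:
--         lowered = text.lower()
--         if any(token in lowered for token in ("feed", "ranking", "algorithm", "timeline")):
--             labels.append("ranking")
--         elif any(token in lowered for token in ("agent", "bot", "synthetic", "ai")):
--             labels.append("synthetic-agents")
--         elif any(token in lowered for token in ("trust", "community", "faction", "group")):
--             labels.append("factions")
--         else:
--             labels.append("general-discourse")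
--     return labels
-- ===== SOURCE B (Python) =====
-- # Reverse-priority layered overwrite: start with a default label for every text,
-- # then sweep the whole list once per group from LOWEST to HIGHEST priority,
-- # overwriting the label wherever the group matches; the last (highest-priority)
-- # matching group wins, which reproduces the cascade's first-match semantics.
-- GROUPS = [
--     ("factions", ("trust", "community", "faction", "group")),
--     ("synthetic-agents", ("agent", "bot", "synthetic", "ai")),
--     ("ranking", ("feed", "ranking", "algorithm", "timeline")),
-- ]
--
-- def cluster_topic_labels(texts):
--     lowered = [t.lower() for t in texts]
--     labels = ["general-discourse"] * len(lowered)
--     for label, tokens in GROUPS: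
--         labels = [label if any(tok in low for tok in tokens) else lab
--                   for lab, low in zip(labels, lowered)]
--     return labels
-- ===== Notes on version B (the rewrite author's own statement) =====
-- stated objective: alternative
-- what changed: Replaces A's per-text first-match if/elif cascade with three staged whole-list passes in reverse priority order that overwrite a default label array (last write wins).
import Mathlib
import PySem

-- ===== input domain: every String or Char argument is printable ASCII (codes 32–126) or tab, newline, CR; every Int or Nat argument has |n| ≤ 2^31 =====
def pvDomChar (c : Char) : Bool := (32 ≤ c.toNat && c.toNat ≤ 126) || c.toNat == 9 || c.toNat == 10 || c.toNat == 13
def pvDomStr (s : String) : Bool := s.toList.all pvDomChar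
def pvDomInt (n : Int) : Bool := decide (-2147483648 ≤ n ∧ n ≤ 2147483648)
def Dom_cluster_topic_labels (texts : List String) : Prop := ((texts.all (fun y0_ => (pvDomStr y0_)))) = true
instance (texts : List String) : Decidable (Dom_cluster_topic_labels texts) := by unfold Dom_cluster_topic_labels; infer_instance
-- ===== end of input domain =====

-- B replaces A's per-text if/elif cascade with layered whole-list overwrite passes in reverse priority order (alternative; same cost).

-- ===== PORT A =====
def cluster_topic_labels (texts : List String) : List String :=
  texts.foldl (fun labels text =>
    let lowered := PySem.Str.lower text
    if (["feed", "ranking", "algorithm", "timeline"].any (fun token => PySem.Str.isIn token lowered)) then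
      labels ++ ["ranking"]
    else if (["agent", "bot", "synthetic", "ai"].any (fun token => PySem.Str.isIn token lowered)) then
      labels ++ ["synthetic-agents"]
    else if (["trust", "community", "faction", "group"].any (fun token => PySem.Str.isIn token lowered)) then
      labels ++ ["factions"]
    else
      labels ++ ["general-discourse"]) []

-- ===== PORT B =====
def pvGROUPS : List (String × List String) :=
  [("factions", ["trust", "community", "faction", "group"]),
   ("synthetic-agents", ["agent", "bot", "synthetic", "ai"]),
   ("ranking", ["feed", "ranking", "algorithm", "timeline"])]

def cluster_topic_labels_alt (texts : List String) : List String :=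
  let lowered := texts.map PySem.Str.lower
  pvGROUPS.foldl (fun labels g =>
    (labels.zip lowered).map (fun p =>
      if g.2.any (fun tok => PySem.Str.isIn tok p.2) then g.1 else p.1))
    (List.replicate lowered.length "general-discourse")

-- ===== PRECONDITION & SPEC =====
def Spec_cluster_topic_labels (texts : List String) (out : List String) : Prop := out = cluster_topic_labels_alt texts
instance (texts : List String) (out : List String) : Decidable (Spec_cluster_topic_labels texts out) := by unfold Spec_cluster_topic_labels; infer_instance

-- ===== CLAIM =====
def Claim_equal_cluster_topic_labels : Prop := ∀ (texts : List String), Dom_cluster_topic_labels texts → Spec_cluster_topic_labels texts (cluster_topic_labels texts)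

-- ===== LEMMAS AND PROOFS =====

-- A's per-element cascade value (proof helper)
def pvStepA (text : String) : String :=
  let lowered := PySem.Str.lower text
  if (["feed", "ranking", "algorithm", "timeline"].any (fun token => PySem.Str.isIn token lowered)) then "ranking"
  else if (["agent", "bot", "synthetic", "ai"].any (fun token => PySem.Str.isIn token lowered)) then "synthetic-agents"
  else if (["trust", "community", "faction", "group"].any (fun token => PySem.Str.isIn token lowered)) then "factions"
  else "general-discourse"

-- B's stack of passes restricted to one element (proof helper)
def pvElemB (groups : List (String × List String)) (lab low : String) : String :=
  groups.foldl (fun l g => if g.2.any (fun tok => PySem.Str.isIn tok low) then g.1 else l) lab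

-- each group pass acts pointwise, hence the whole stack of passes acts pointwise
theorem pv_passes_cons (groups : List (String × List String)) (lab low : String)
    (labels lows : List String) :
    groups.foldl (fun ls g =>
      (ls.zip (low :: lows)).map (fun p =>
        if g.2.any (fun tok => PySem.Str.isIn tok p.2) then g.1 else p.1))
      (lab :: labels)
    = pvElemB groups lab low ::
      groups.foldl (fun ls g =>
        (ls.zip lows).map (fun p =>
          if g.2.any (fun tok => PySem.Str.isIn tok p.2) then g.1 else p.1))
        labels := by
  induction groups generalizing lab labels with
  | nil => simp [pvElemB]
  | cons g gs ih =>
      simp only [List.foldl_cons, List.zip_cons_cons, List.map_cons, pvElemB]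
      exact ih _ _

-- per element, B's reverse-priority overwrites compute A's cascade
theorem pv_elem_eq (t : String) : pvElemB pvGROUPS "general-discourse" (PySem.Str.lower t) = pvStepA t := rfl

-- the three passes over the whole list compute the per-element overwrite stack pointwise
theorem pv_passes_all (lows : List String) :
    pvGROUPS.foldl (fun ls g =>
      (ls.zip lows).map (fun p =>
        if g.2.any (fun tok => PySem.Str.isIn tok p.2) then g.1 else p.1))
      (List.replicate lows.length "general-discourse")
    = lows.map (pvElemB pvGROUPS "general-discourse") := by
  induction lows with
  | nil => rfl
  | cons low lows ih =>
      rw [List.length_cons, List.replicate_succ, pv_passes_cons, ih, List.map_cons]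

theorem pv_alt_eq_map (texts : List String) : cluster_topic_labels_alt texts = texts.map pvStepA := by
  simp only [cluster_topic_labels_alt]
  rw [pv_passes_all, List.map_map]
  simp only [Function.comp_def, pv_elem_eq]

theorem pv_stepA_fun :
    (fun (labels : List String) (text : String) =>
      let lowered := PySem.Str.lower text
      if (["feed", "ranking", "algorithm", "timeline"].any (fun token => PySem.Str.isIn token lowered)) then
        labels ++ ["ranking"]
      else if (["agent", "bot", "synthetic", "ai"].any (fun token => PySem.Str.isIn token lowered)) then
        labels ++ ["synthetic-agents"]
      else if (["trust", "community", "faction", "group"].any (fun token => PySem.Str.isIn token lowered)) then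
        labels ++ ["factions"]
      else
        labels ++ ["general-discourse"])
    = fun labels text => labels ++ [pvStepA text] := by
  funext labels text
  simp only [pvStepA]
  generalize (["feed", "ranking", "algorithm", "timeline"].any (fun token => PySem.Str.isIn token (PySem.Str.lower text))) = c1
  generalize (["agent", "bot", "synthetic", "ai"].any (fun token => PySem.Str.isIn token (PySem.Str.lower text))) = c2
  generalize (["trust", "community", "faction", "group"].any (fun token => PySem.Str.isIn token (PySem.Str.lower text))) = c3
  cases c1 <;> cases c2 <;> cases c3 <;> rfl

theorem cluster_topic_labels_spec : Claim_equal_cluster_topic_labels := by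
  intro texts _
  show cluster_topic_labels texts = cluster_topic_labels_alt texts
  rw [pv_alt_eq_map]
  unfold cluster_topic_labels
  rw [pv_stepA_fun, PySem.List.foldl_append_singleton_eq_map]
  rfl
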